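-- pv_equiv track=rewrite | github.com/KauanyStefany/VetConectaNovo | fix_remaining_tests.py | fix_multiline_tutor
-- ===== SOURCE A (Python) =====
-- def fix_multiline_tutor(content):
--     """Corrige construções multilinhas de Tutor."""
--     lines = content.split('\n')
--     result = []
--     i = 0
--
--     while i < len(lines):
--         line = lines[i]
--
--         # Detectar Tutor(
--         if ('Tutor(' in line or 'tutor = Tutor(' in line.lower()) and 'Tutor.__init__' not in line:
--             # Verificar se já tem perfil
--             chunk = '\n'.join(lines[i:min(i+25, len(lines))])
--             if 'perfil=' not in chunk and 'perfil =' not in chunk and ('quantidade_pets' in chunk or 'descricao_pets' in chunk):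
--                 # Precisa adicionar campos de Usuario
--                 result.append(line)
--                 i += 1
--
--                 # Encontrar onde inserir (após telefone, antes de quantidade_pets)
--                 while i < len(lines) and 'quantidade_pets' not in lines[i].lower():
--                     current_line = lines[i]
--                     result.append(current_line)
--                     if 'telefone=' in current_line or 'telefone =' in current_line:
--                         # Inserir campos após telefone
--                         result.append('            perfil="tutor",')
--                         result.append('            foto=None,')
--                         result.append('            token_redefinicao=None,')
--                         result.append('            data_token=None,')
--                         result.append('            data_cadastro=None,')
--                     i += 1
--                 continue
--
--         result.append(line)
--         i += 1
--
--     return '\n'.join(result)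
-- ===== SOURCE B (Python) =====
-- _USUARIO_FIELDS = [
--     '            perfil="tutor",',
--     '            foto=None,',
--     '            token_redefinicao=None,',
--     '            data_token=None,',
--     '            data_cadastro=None,',
-- ]
--
--
-- def fix_multiline_tutor(content):
--     """Corrige construções multilinhas de Tutor (two staged passes)."""
--     lines = content.split('\n')
--     n = len(lines)
--
--     # Pass 1: mark the interior line indices of every Tutor( block needing fields.
--     interior = []
--     i = 0
--     while i < n:
--         line = lines[i]
--         if ('Tutor(' in line or 'tutor = Tutor(' in line.lower()) and 'Tutor.__init__' not in line:
--             chunk = '\n'.join(lines[i:i + 25])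
--             if ('perfil=' not in chunk and 'perfil =' not in chunk
--                     and ('quantidade_pets' in chunk or 'descricao_pets' in chunk)):
--                 j = i + 1
--                 while j < n and 'quantidade_pets' not in lines[j].lower():
--                     interior.append(j)
--                     j += 1
--                 i = j
--                 continue
--         i += 1
--
--     # Pass 2: emit every line; after an interior telefone line, the Usuario fields.
--     out = []
--     for idx, line in enumerate(lines):
--         out.append(line)
--         if idx in interior and ('telefone=' in line or 'telefone =' in line):
--             out.extend(_USUARIO_FIELDS)
--     return '\n'.join(out)
-- ===== Notes on version B (the rewrite author's own statement) =====
-- stated objective: alternative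
-- what changed: A builds the output in one interleaved pass with nested while-loops; B is two staged passes: pass 1 only scans and records the set of interior line indices of each Tutor block, pass 2 emits every line once and appends the five Usuario fields after any recorded telefone line.
import Mathlib
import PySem

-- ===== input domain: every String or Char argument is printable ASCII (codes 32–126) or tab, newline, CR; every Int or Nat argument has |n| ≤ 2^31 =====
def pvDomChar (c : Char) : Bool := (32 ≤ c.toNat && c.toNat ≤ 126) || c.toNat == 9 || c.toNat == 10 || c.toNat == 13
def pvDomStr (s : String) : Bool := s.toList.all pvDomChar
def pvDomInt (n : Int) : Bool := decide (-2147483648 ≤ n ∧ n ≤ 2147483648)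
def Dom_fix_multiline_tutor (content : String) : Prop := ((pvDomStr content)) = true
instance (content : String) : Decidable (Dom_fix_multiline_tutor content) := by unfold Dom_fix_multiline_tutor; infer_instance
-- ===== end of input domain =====

-- B replaces A's single interleaved pass (nested while-loops writing the output) by
-- two staged passes: pass 1 records the interior line indices of each Tutor block,
-- pass 2 emits every line once and inserts the fields after recorded telefone lines.
-- Objective: alternative decomposition, same cost.

-- the five inserted Usuario field lines (shared literal constant)
def pvUsuarioFields : List String :=
  ["            perfil=\"tutor\",",
   "            foto=None,",
   "            token_redefinicao=None,",
   "            data_token=None,",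
   "            data_cadastro=None,"]

-- ===== PORT A =====
-- A's two while loops over index i, as structural recursion over the suffix of
-- lines; the Bool flag distinguishes the outer loop (false) from the inner
-- insertion loop (true); chunk lines[i:i+25] is the suffix's take 25.
def fixGoA : Bool → List String → List String
  | _, [] => []
  | true, cur :: rest =>
      if PySem.Str.isIn "quantidade_pets" (PySem.Str.lower cur) then
        fixGoA false (cur :: rest)
      else
        cur :: (if PySem.Str.isIn "telefone=" cur || PySem.Str.isIn "telefone =" cur then
                  pvUsuarioFields ++ fixGoA true rest
                else fixGoA true rest)
  | false, line :: rest =>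
      if (PySem.Str.isIn "Tutor(" line
            || PySem.Str.isIn "tutor = Tutor(" (PySem.Str.lower line))
          && !(PySem.Str.isIn "Tutor.__init__" line) then
        let chunk := PySem.Str.join "\n" ((line :: rest).take 25)
        if !(PySem.Str.isIn "perfil=" chunk) && !(PySem.Str.isIn "perfil =" chunk)
            && (PySem.Str.isIn "quantidade_pets" chunk
                  || PySem.Str.isIn "descricao_pets" chunk) then
          line :: fixGoA true rest
        else
          line :: fixGoA false rest
      else
        line :: fixGoA false rest
termination_by b l => 2 * l.length + (if b then 1 else 0)

def fix_multiline_tutor (content : String) : String :=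
  PySem.Str.join "\n" (fixGoA false ((PySem.Str.split? content "\n").getD []))  -- sep ≠ "", so split? is some

-- ===== PORT B =====
-- Source B's two passes.
def altQP (l : String) : Bool := PySem.Str.isIn "quantidade_pets" (PySem.Str.lower l)

def altTel (l : String) : Bool := PySem.Str.isIn "telefone=" l || PySem.Str.isIn "telefone =" l

-- pass 1's detection test (the guard of Source B's two nested ifs, as one boolean)
def altDetect (line : String) (window : List String) : Bool :=
  ((PySem.Str.isIn "Tutor(" line || PySem.Str.isIn "tutor = Tutor(" (PySem.Str.lower line))
     && !(PySem.Str.isIn "Tutor.__init__" line))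
  && (let chunk := PySem.Str.join "\n" window
      !(PySem.Str.isIn "perfil=" chunk) && !(PySem.Str.isIn "perfil =" chunk)
        && (PySem.Str.isIn "quantidade_pets" chunk || PySem.Str.isIn "descricao_pets" chunk))

-- pass 1's inner while: the indices appended to `interior`, the final j, the rest of the lines
def collectInner : Nat → List String → List Nat × Nat × List String
  | j, [] => ([], j, [])
  | j, l :: rest =>
      if altQP l then ([], j, l :: rest)
      else (j :: (collectInner (j + 1) rest).1,
            (collectInner (j + 1) rest).2.1,
            (collectInner (j + 1) rest).2.2)

theorem collectInner_len : ∀ (l : List String) (j : Nat),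
    (collectInner j l).2.2.length ≤ l.length := by
  intro l
  induction l with
  | nil => intro j; simp [collectInner]
  | cons x rest ih =>
      intro j
      by_cases h : altQP x = true
      · simp [collectInner, h]
      · have h' : altQP x = false := by simpa using h
        simp only [collectInner, h', Bool.false_eq_true, if_false]
        exact Nat.le_succ_of_le (ih (j + 1))

-- pass 1's outer while
def markGo : Nat → List String → List Nat
  | _, [] => []
  | idx, line :: rest =>
      if altDetect line ((line :: rest).take 25) then
        (collectInner (idx + 1) rest).1
          ++ markGo (collectInner (idx + 1) rest).2.1 (collectInner (idx + 1) rest).2.2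
      else markGo (idx + 1) rest
termination_by _ l => l.length
decreasing_by
  · exact Nat.lt_succ_of_le (collectInner_len _ _)
  · exact Nat.lt_succ_self _

-- pass 2: every line in order, plus the fields after an interior telefone line
def pass2 (interior : List Nat) : Nat → List String → List String
  | _, [] => []
  | idx, line :: rest =>
      line :: ((if interior.contains idx && altTel line then pvUsuarioFields else [])
                 ++ pass2 interior (idx + 1) rest)

def fix_multiline_tutor_alt (content : String) : String :=
  let lines := (PySem.Str.split? content "\n").getD []  -- sep ≠ "", so split? is some
  PySem.Str.join "\n" (pass2 (markGo 0 lines) 0 lines)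

-- ===== PRECONDITION & SPEC =====
def Spec_fix_multiline_tutor (content : String) (out : String) : Prop := out = fix_multiline_tutor_alt content
instance (content : String) (out : String) : Decidable (Spec_fix_multiline_tutor content out) := by unfold Spec_fix_multiline_tutor; infer_instance

-- ===== CLAIM (what is proved, stated in full; the proofs are below) =====
def Claim_equal_fix_multiline_tutor : Prop := ∀ (content : String), Dom_fix_multiline_tutor content → Spec_fix_multiline_tutor content (fix_multiline_tutor content)

-- ===== LEMMAS AND PROOFS =====

def altExpand (seg : String) : List String :=
  if altTel seg then seg :: pvUsuarioFields else [seg]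

-- closed form of pass 1's inner while
theorem collectInner_eq (l : List String) : ∀ (j : Nat),
    collectInner j l
      = ((List.range (l.takeWhile fun x => !altQP x).length).map (· + j),
         j + (l.takeWhile fun x => !altQP x).length,
         l.dropWhile fun x => !altQP x) := by
  induction l with
  | nil => intro j; simp [collectInner]
  | cons x rest ih =>
      intro j
      by_cases h : altQP x = true
      · simp [collectInner, h, List.takeWhile, List.dropWhile]
      · have h' : altQP x = false := by simpa using h
        simp only [collectInner, Bool.false_eq_true, if_false, ih (j + 1),
          List.takeWhile_cons, List.dropWhile_cons, h', Bool.not_false, if_true,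
          List.length_cons]
        refine Prod.ext ?_ (Prod.ext (by simp; omega) rfl)
        show j :: (List.range _).map (· + (j + 1))
            = (List.range (_ + 1)).map (· + j)
        rw [List.range_succ_eq_map]
        simp only [List.map_cons, Nat.zero_add, List.map_map]
        exact congrArg (j :: ·) (List.map_congr_left fun m _ => by simp [Function.comp]; omega).symm

-- every index pass 1 records is ≥ the current index
theorem markGo_lb_n : ∀ (n : Nat) (l : List String), l.length ≤ n →
    ∀ (idx m : Nat), m ∈ markGo idx l → idx ≤ m := by
  intro n
  induction n with
  | zero =>
      intro l hl idx m hm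
      have : l = [] := List.length_eq_zero_iff.mp (Nat.le_zero.mp hl)
      subst this; simp [markGo] at hm
  | succ n ih =>
      intro l hl idx m hm
      cases l with
      | nil => simp [markGo] at hm
      | cons line rest =>
        have hrest : rest.length ≤ n := by simpa using hl
        by_cases hdet : altDetect line ((line :: rest).take 25) = true
        · rw [markGo, if_pos hdet, collectInner_eq] at hm
          rcases List.mem_append.1 hm with h | h
          · simp at h; omega
          · have hdw : (rest.dropWhile fun x => !altQP x).length ≤ n :=
              le_trans (List.length_dropWhile_le _ _) hrest
            have h' : m ∈ markGo (idx + 1 + (rest.takeWhile fun x => !altQP x).length)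
                (rest.dropWhile fun x => !altQP x) := h
            have := ih _ hdw _ _ h'
            omega
        · rw [markGo, if_neg hdet] at hm
          have := ih rest hrest (idx + 1) m hm
          omega

theorem markGo_lb (idx : Nat) (l : List String) (m : Nat) (hm : m ∈ markGo idx l) : idx ≤ m :=
  markGo_lb_n l.length l (le_refl _) idx m hm

-- pass 2 distributes over list append
theorem pass2_append (I : List Nat) (a : List String) : ∀ (b : List String) (idx : Nat),
    pass2 I idx (a ++ b) = pass2 I idx a ++ pass2 I (idx + a.length) b := by
  induction a with
  | nil => intro b idx; simp [pass2]
  | cons x rest ih =>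
      intro b idx
      simp [pass2, ih, Nat.add_assoc, Nat.add_comm 1 rest.length]

-- on a stretch of indices all inside `interior`, pass 2 is per-line expansion
theorem pass2_all_in (I : List Nat) (l : List String) : ∀ (idx : Nat),
    (∀ k, k < l.length → (idx + k) ∈ I) →
    pass2 I idx l = l.flatMap altExpand := by
  induction l with
  | nil => intro idx _; simp [pass2]
  | cons x rest ih =>
      intro idx h
      have h0 : idx ∈ I := by simpa using h 0 (by simp)
      have htail := ih (idx + 1) (fun k hk => by
        rw [show idx + 1 + k = idx + (k + 1) by omega]
        exact h (k + 1) (by simpa using hk))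
      have hc : I.contains idx = true := List.contains_iff_mem.mpr h0
      simp only [pass2, hc, Bool.true_and, htail, List.flatMap_cons, altExpand]
      split <;> simp

-- indices below the current position never fire: drop them from the left of `interior`
theorem pass2_drop_low (s M : List Nat) (l : List String) : ∀ (idx : Nat),
    (∀ m ∈ s, m < idx) →
    pass2 (s ++ M) idx l = pass2 M idx l := by
  induction l with
  | nil => intro idx _; simp [pass2]
  | cons x rest ih =>
      intro idx h
      have hns : idx ∉ s := fun hm => absurd (h idx hm) (lt_irrefl idx)
      have hc : (s ++ M).contains idx = M.contains idx := by
        cases e : M.contains idx with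
        | true => simp [List.contains_iff_mem.mp e]
        | false =>
            have : idx ∉ s ++ M := by
              intro hmem
              rcases List.mem_append.1 hmem with h1 | h1
              · exact hns h1
              · rw [List.contains_iff_mem.mpr h1] at e; cases e
            simpa using this
      have htail := ih (idx + 1) (fun m hm => Nat.lt_succ_of_lt (h m hm))
      simp only [pass2, hc, htail]

-- a non-member index never fires
theorem pass2_cons_notmem (I : List Nat) (idx : Nat) (x : String) (rest : List String)
    (h : ¬ idx ∈ I) :
    pass2 I idx (x :: rest) = x :: pass2 I (idx + 1) rest := by
  simp [pass2, h]

-- A's inner while equals per-line expansion of the block, then the outer loop on the rest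
theorem fixGoA_true_eq (l : List String) :
    fixGoA true l
      = (l.takeWhile fun x => !altQP x).flatMap altExpand
          ++ fixGoA false (l.dropWhile fun x => !altQP x) := by
  induction l with
  | nil => simp [fixGoA]
  | cons x rest ih =>
      by_cases h : altQP x = true
      · have h' : PySem.Str.isIn "quantidade_pets" (PySem.Str.lower x) = true := h
        rw [fixGoA, if_pos h']
        simp [h]
      · have h' : PySem.Str.isIn "quantidade_pets" (PySem.Str.lower x) = false := by
          simpa [altQP] using h
        have h2 : altQP x = false := by simpa [altQP] using h
        rw [fixGoA, if_neg (by rw [h']; simp)]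
        simp only [List.takeWhile_cons, List.dropWhile_cons, h2, Bool.not_false, if_true,
          List.flatMap_cons, altExpand, altTel]
        split_ifs with ht <;> simp [ih]

-- main invariant: A's outer loop = pass 2 under pass 1's marks, at any starting index
theorem fixGoA_eq_pass2 : ∀ (n : Nat) (l : List String), l.length ≤ n →
    ∀ (idx : Nat), fixGoA false l = pass2 (markGo idx l) idx l := by
  intro n
  induction n with
  | zero =>
      intro l hl idx
      have : l = [] := List.length_eq_zero_iff.mp (Nat.le_zero.mp hl)
      subst this; simp [fixGoA, pass2]
  | succ n ih =>
      intro l hl idx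
      cases l with
      | nil => simp [fixGoA, pass2]
      | cons line rest =>
        have hrest : rest.length ≤ n := by simpa using hl
        by_cases hdet : altDetect line ((line :: rest).take 25) = true
        · -- detection: A enters its inner loop, B has marked exactly that block
          have hd := hdet
          unfold altDetect at hd
          have hc1 := (Bool.and_eq_true _ _ ▸ hd).1
          have hc2 := (Bool.and_eq_true _ _ ▸ hd).2
          have hA : fixGoA false (line :: rest) = line :: fixGoA true rest := by
            rw [fixGoA, if_pos hc1]
            exact if_pos hc2
          set tw := rest.takeWhile fun x => !altQP x with htw
          set dw := rest.dropWhile fun x => !altQP x with hdw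
          have hM : markGo idx (line :: rest)
              = (List.range tw.length).map (· + (idx + 1))
                  ++ markGo (idx + 1 + tw.length) dw := by
            rw [markGo, if_pos hdet, collectInner_eq]
          have hdwlen : dw.length ≤ n := le_trans (List.length_dropWhile_le _ _) hrest
          have hsplit : rest = tw ++ dw := (List.takeWhile_append_dropWhile).symm
          have hhead : ¬ idx ∈ markGo idx (line :: rest) := by
            intro hmem; have := markGo_lb _ _ _ hmem
            rw [hM] at hmem
            rcases List.mem_append.1 hmem with h | h
            · simp at h; omega
            · have := markGo_lb _ _ _ h; omega
          rw [hA, pass2_cons_notmem _ _ _ _ hhead]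
          congr 1
          rw [hM]
          conv_rhs => rw [hsplit]
          rw [pass2_append]
          have hblock : pass2 ((List.range tw.length).map (· + (idx + 1))
                ++ markGo (idx + 1 + tw.length) dw) (idx + 1) tw
              = tw.flatMap altExpand := by
            apply pass2_all_in
            intro k hk
            apply List.mem_append.mpr
            left
            simp only [List.mem_map, List.mem_range]
            exact ⟨k, hk, by omega⟩
          have htail : pass2 ((List.range tw.length).map (· + (idx + 1))
                ++ markGo (idx + 1 + tw.length) dw) (idx + 1 + tw.length) dw
              = pass2 (markGo (idx + 1 + tw.length) dw) (idx + 1 + tw.length) dw := by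
            apply pass2_drop_low
            intro m hm
            simp only [List.mem_map, List.mem_range] at hm
            omega
          rw [hblock, htail, fixGoA_true_eq, ← htw, ← hdw,
            ← ih dw hdwlen (idx + 1 + tw.length)]
        · -- no detection: both just emit the line
          have hA : fixGoA false (line :: rest) = line :: fixGoA false rest := by
            rw [fixGoA]
            by_cases h1 : ((PySem.Str.isIn "Tutor(" line
                || PySem.Str.isIn "tutor = Tutor(" (PySem.Str.lower line))
              && !(PySem.Str.isIn "Tutor.__init__" line)) = true
            · rw [if_pos h1]
              have h2 : ¬ ((!(PySem.Str.isIn "perfil="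
                    (PySem.Str.join "\n" ((line :: rest).take 25)))
                  && !(PySem.Str.isIn "perfil ="
                    (PySem.Str.join "\n" ((line :: rest).take 25)))
                  && (PySem.Str.isIn "quantidade_pets"
                        (PySem.Str.join "\n" ((line :: rest).take 25))
                      || PySem.Str.isIn "descricao_pets"
                        (PySem.Str.join "\n" ((line :: rest).take 25)))) = true) := by
                intro hc
                apply hdet
                unfold altDetect
                rw [h1, hc]
                rfl
              exact if_neg h2
            · exact if_neg h1
          have hM : markGo idx (line :: rest) = markGo (idx + 1) rest := by
            rw [markGo, if_neg hdet]
          have hhead : ¬ idx ∈ markGo idx (line :: rest) := by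
            rw [hM]; intro hmem; have := markGo_lb _ _ _ hmem; omega
          rw [hA, pass2_cons_notmem _ _ _ _ hhead, hM, ih rest hrest (idx + 1)]

-- ===== VERDICT (by name: the statement is the Claim_ definition above) =====
theorem fix_multiline_tutor_spec : Claim_equal_fix_multiline_tutor := by
  intro content _
  unfold Spec_fix_multiline_tutor fix_multiline_tutor fix_multiline_tutor_alt
  rw [fixGoA_eq_pass2 _ _ (le_refl _) 0]
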